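-- pv_equiv track=rewrite | github.com/openstack/neutron | neutron/tests/unit/agent/linux/test_ip_lib.py | _remove_dev_args
-- ===== SOURCE A (Python) =====
-- def _remove_dev_args(args):
--     def args_without_dev():
--         previous = None
--         for arg in args:
--             if 'dev' not in (arg, previous):
--                 yield arg
--             previous = arg
--
--     return tuple(arg for arg in args_without_dev())
-- ===== SOURCE B (Python) =====
-- def _remove_dev_args(args):
--     removal = set()
--     for i, arg in enumerate(args):
--         if arg == 'dev':
--             removal.add(i)
--             removal.add(i + 1)
--     return tuple(arg for i, arg in enumerate(args) if i not in removal)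
-- ===== Notes on version B (the rewrite author's own statement) =====
-- stated objective: alternative
-- what changed: Replaces the single-pass generator that tracks a running 'previous' variable by two passes: one pass precomputes a set of removal indices (each 'dev' index and its successor), a second pass keeps the elements whose index is not in that set.
import Mathlib
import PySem

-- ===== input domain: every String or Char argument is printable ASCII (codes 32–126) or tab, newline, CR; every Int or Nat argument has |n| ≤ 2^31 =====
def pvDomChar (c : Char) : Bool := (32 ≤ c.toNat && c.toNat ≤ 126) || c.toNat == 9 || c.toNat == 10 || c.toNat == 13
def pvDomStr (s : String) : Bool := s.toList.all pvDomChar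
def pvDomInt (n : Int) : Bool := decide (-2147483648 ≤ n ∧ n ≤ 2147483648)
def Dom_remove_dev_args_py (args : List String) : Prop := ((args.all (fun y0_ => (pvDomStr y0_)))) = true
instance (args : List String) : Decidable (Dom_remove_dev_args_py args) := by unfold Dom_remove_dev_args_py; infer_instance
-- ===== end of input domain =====

-- B replaces A's single pass with a running 'previous' variable by a precomputed
-- set of removal indices plus an index-filtering second pass (alternative decomposition).

-- ===== PORT A =====
-- one pass; state = (output so far, previous element), keep arg iff neither arg nor previous is "dev"
def remove_dev_args_py (args : List String) : List String :=
  (args.foldl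
    (fun (st : List String × Option String) arg =>
      (if arg ≠ "dev" ∧ st.2 ≠ some "dev" then st.1 ++ [arg] else st.1, some arg))
    ([], none)).1

-- ===== PORT B =====
-- pass 1: removal index set {i, i+1 : args[i] = "dev"}; pass 2: keep entries whose index is outside it
def remove_dev_args_py_alt (args : List String) : List String :=
  let removal : PySem.Set Int :=
    (PySem.List.enumerate args).foldl
      (fun s p => if p.2 = "dev" then PySem.Set.add (PySem.Set.add s p.1) (p.1 + 1) else s)
      PySem.Set.empty
  (PySem.List.enumerate args).foldl
    (fun acc p => if PySem.Set.contains removal p.1 then acc else acc ++ [p.2]) []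

-- ===== PRECONDITION & SPEC =====
def Spec_remove_dev_args_py (args : List String) (out : List String) : Prop := out = remove_dev_args_py_alt args
instance (args : List String) (out : List String) : Decidable (Spec_remove_dev_args_py args out) := by unfold Spec_remove_dev_args_py; infer_instance

-- ===== CLAIM (what is proved, stated in full; the proofs are below) =====
def Claim_equal_remove_dev_args_py : Prop := ∀ (args : List String), Dom_remove_dev_args_py args → Spec_remove_dev_args_py args (remove_dev_args_py args)

-- ===== LEMMAS AND PROOFS =====

-- reference recursion: what both programs compute, threading the previous element
def refRun (prev : Option String) : List String → List String
  | [] => []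
  | a :: t => (if a ≠ "dev" ∧ prev ≠ some "dev" then [a] else []) ++ refRun (some a) t

theorem A_eq_refRun (t : List String) (acc : List String) (prev : Option String) :
    (t.foldl
      (fun (st : List String × Option String) arg =>
        (if arg ≠ "dev" ∧ st.2 ≠ some "dev" then st.1 ++ [arg] else st.1, some arg))
      (acc, prev)).1 = acc ++ refRun prev t := by
  induction t generalizing acc prev with
  | nil => simp [refRun]
  | cons a t ih =>
    simp only [List.foldl_cons, refRun]
    by_cases h : a ≠ "dev" ∧ prev ≠ some "dev" <;> simp [h, ih]

theorem mem_fold_add2 (l : List (Int × String)) (s0 : PySem.Set Int) (x : Int) :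
    x ∈ l.foldl
        (fun s p => if p.2 = "dev" then PySem.Set.add (PySem.Set.add s p.1) (p.1 + 1) else s)
        s0 ↔
      x ∈ s0 ∨ ∃ p ∈ l, p.2 = "dev" ∧ (x = p.1 ∨ x = p.1 + 1) := by
  induction l generalizing s0 with
  | nil => simp
  | cons p l ih =>
    simp only [List.foldl_cons, List.mem_cons]
    by_cases h : p.2 = "dev"
    · rw [if_pos h, ih]
      simp [PySem.Set.mem_add, h]
      simp [or_assoc]
    · rw [if_neg h, ih]
      constructor
      · rintro (hs | ⟨q, hq, hd, hx⟩)
        · exact Or.inl hs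
        · exact Or.inr ⟨q, Or.inr hq, hd, hx⟩
      · rintro (hs | ⟨q, (rfl | hq), hd, hx⟩)
        · exact Or.inl hs
        · exact absurd hd h
        · exact Or.inr ⟨q, hq, hd, hx⟩

-- membership in B's removal set, over the whole input
theorem mem_removal (args : List String) (x : Int) :
    x ∈ (PySem.List.enumerate args).foldl
        (fun s p => if p.2 = "dev" then PySem.Set.add (PySem.Set.add s p.1) (p.1 + 1) else s)
        PySem.Set.empty ↔
      ∃ k : Nat, ∃ h : k < args.length, args[k] = "dev" ∧ (x = k ∨ x = k + 1) := by
  rw [mem_fold_add2]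
  simp only [PySem.Set.empty, List.not_mem_nil, false_or]
  constructor
  · rintro ⟨p, hp, hd, hx⟩
    rw [PySem.List.mem_enumerate_iff] at hp
    obtain ⟨k, hk, rfl⟩ := hp
    exact ⟨k, hk, hd, by simpa using hx⟩
  · rintro ⟨k, hk, hd, hx⟩
    refine ⟨((k : Int), args[k]), ?_, hd, by simpa using hx⟩
    rw [PySem.List.mem_enumerate_iff]
    exact ⟨k, hk, by simp⟩

-- the previous element seen before index n
def prevAt (args : List String) (n : Nat) : Option String :=
  if n = 0 then none else args[n - 1]?

theorem B_eq_refRun (args : List String) (t : List String) (n : Nat) (acc : List String)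
    (ht : args.drop n = t) :
    (PySem.List.enumerate t (n : Int)).foldl
      (fun acc p =>
        if PySem.Set.contains
            ((PySem.List.enumerate args).foldl
              (fun s p => if p.2 = "dev" then PySem.Set.add (PySem.Set.add s p.1) (p.1 + 1) else s)
              PySem.Set.empty) p.1
        then acc else acc ++ [p.2]) acc
      = acc ++ refRun (prevAt args n) t := by
  induction t generalizing n acc with
  | nil => simp [PySem.List.enumerate, refRun]
  | cons a t ih =>
    have hn : n < args.length := by
      by_contra h
      simp [List.drop_eq_nil_of_le (Nat.le_of_not_lt h)] at ht
    have hcd := List.getElem_cons_drop (as := args) (i := n) (h := hn)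
    rw [ht] at hcd
    have hget : args[n] = a := (List.cons.injEq _ _ _ _ ▸ hcd).1
    have hdrop : args.drop (n + 1) = t := (List.cons.injEq _ _ _ _ ▸ hcd).2
    rw [PySem.List.enumerate_cons, List.foldl_cons]
    dsimp only
    -- decide the membership test at index n
    have hcond : (PySem.Set.contains
        ((PySem.List.enumerate args).foldl
          (fun s p => if p.2 = "dev" then PySem.Set.add (PySem.Set.add s p.1) (p.1 + 1) else s)
          PySem.Set.empty) (n : Int) = true)
        ↔ (a = "dev" ∨ prevAt args n = some "dev") := by
      rw [PySem.Set.contains_iff, mem_removal]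
      constructor
      · rintro ⟨k, hk, hd, hx⟩
        rcases hx with hx | hx
        · have : k = n := by exact_mod_cast hx.symm
          subst this
          exact Or.inl (hget ▸ hd)
        · have hk1 : n = k + 1 := by exact_mod_cast hx
          right
          simp [prevAt, hk1, List.getElem?_eq_getElem hk, hd]
      · rintro (hd | hd)
        · exact ⟨n, hn, hget ▸ hd, Or.inl rfl⟩
        · have hn0 : n ≠ 0 := by
            intro h; simp [prevAt, h] at hd
          have hlt : n - 1 < args.length := Nat.lt_of_le_of_lt (Nat.sub_le _ _) hn
          have : args[n - 1] = "dev" := by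
            have := hd
            simp only [prevAt, if_neg hn0, List.getElem?_eq_getElem hlt,
              Option.some.injEq] at this
            exact this
          exact ⟨n - 1, hlt, this, Or.inr (by omega)⟩
    have hprev : prevAt args (n + 1) = some a := by
      simp [prevAt, List.getElem?_eq_getElem hn, hget]
    by_cases h : a = "dev" ∨ prevAt args n = some "dev"
    · rw [if_pos (hcond.mpr h)]
      have hih := ih (n + 1) acc hdrop
      push_cast at hih
      rw [hih, hprev]
      have hnk : ¬ (a ≠ "dev" ∧ prevAt args n ≠ some "dev") := by tauto
      simp [refRun, hnk]
    · rw [if_neg (fun hc => h (hcond.mp hc))]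
      have hih := ih (n + 1) (acc ++ [a]) hdrop
      push_cast at hih
      rw [hih, hprev]
      have hk : a ≠ "dev" ∧ prevAt args n ≠ some "dev" := by tauto
      simp [refRun, hk]

-- ===== VERDICT (by name: the statement is the Claim_ definition above) =====
theorem remove_dev_args_py_spec : Claim_equal_remove_dev_args_py := by
  intro args _
  unfold Spec_remove_dev_args_py remove_dev_args_py remove_dev_args_py_alt
  rw [A_eq_refRun]
  have := B_eq_refRun args args 0 [] (by simp)
  simpa [prevAt] using this.symm
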